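-- pv_equiv track=rewrite | github.com/Ap01lo/MapReduce-MultiHash | Hash.py | generate_bitmap
-- ===== SOURCE A (Python) =====
-- def generate_bitmap(buckets,support):
--     bitmap = 0
--     for bucket in buckets:
--         if len(bucket) >= support:
--             # 比置信度大，置1左移
--             bitmap += 1
--             bitmap <<= 1
--         else:
--             # 比置信度小，置0左移
--             bitmap <<= 1
--     bitmap >>= 1
--     return bitmap
-- ===== SOURCE B (Python) =====
-- def generate_bitmap(buckets, support):
--     bits = ''.join('1' if len(b) >= support else '0' for b in buckets)
--     return int(bits, 2) if bits else 0
-- ===== Notes on version B (the rewrite author's own statement) =====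
-- stated objective: simpler
-- what changed: Replaces A's shift-accumulate loop (with a trailing corrective right shift) by building the MSB-first bit string in one pass and converting it with a single int(bits, 2) call.
import Mathlib
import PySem

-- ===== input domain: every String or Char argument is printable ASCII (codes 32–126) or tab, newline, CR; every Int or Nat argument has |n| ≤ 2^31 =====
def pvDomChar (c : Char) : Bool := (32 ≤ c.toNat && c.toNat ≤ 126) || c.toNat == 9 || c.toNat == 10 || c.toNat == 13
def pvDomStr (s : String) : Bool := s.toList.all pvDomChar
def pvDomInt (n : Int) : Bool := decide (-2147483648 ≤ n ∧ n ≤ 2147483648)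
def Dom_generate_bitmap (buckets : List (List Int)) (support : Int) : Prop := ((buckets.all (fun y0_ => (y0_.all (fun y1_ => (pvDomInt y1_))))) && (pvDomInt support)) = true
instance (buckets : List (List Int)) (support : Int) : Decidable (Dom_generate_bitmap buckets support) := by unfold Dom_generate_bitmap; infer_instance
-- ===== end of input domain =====

-- ===== PORT A =====
-- A: shift-accumulate loop, then a final right shift (Python >> 1 = floor division by 2)
def generate_bitmap (buckets : List (List Int)) (support : Int) : Int :=
  let bitmap : Int :=
    buckets.foldl (fun bitmap bucket =>
      if (bucket.length : Int) ≥ support then (bitmap + 1) * 2 else bitmap * 2) 0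
  PySem.Int.floordiv bitmap 2

-- ===== PORT B =====
-- B: build the MSB-first bit string, then one base-2 conversion.
-- int(bits, 2) is ported by hand as a base-2 fold; exact here since bits holds only '0'/'1'.
def generate_bitmap_alt (buckets : List (List Int)) (support : Int) : Int :=
  let bits : List Char := buckets.map (fun b => if (b.length : Int) ≥ support then '1' else '0')
  if bits.isEmpty then 0
  else bits.foldl (fun acc c => acc * 2 + (if c = '1' then 1 else 0)) 0

-- ===== PRECONDITION & SPEC =====
def Spec_generate_bitmap (buckets : List (List Int)) (support : Int) (out : Int) : Prop := out = generate_bitmap_alt buckets support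
instance (buckets : List (List Int)) (support : Int) (out : Int) : Decidable (Spec_generate_bitmap buckets support out) := by unfold Spec_generate_bitmap; infer_instance

-- ===== CLAIM (what is proved, stated in full; the proofs are below) =====
def Claim_equal_generate_bitmap : Prop := ∀ (buckets : List (List Int)) (support : Int), Dom_generate_bitmap buckets support → Spec_generate_bitmap buckets support (generate_bitmap buckets support)

-- ===== LEMMAS AND PROOFS =====

-- ===== VERDICT (by name: the statement is the Claim_ definition above) =====
theorem pv_fold_double (l : List (List Int)) (support : Int) (a : Int) :
    l.foldl (fun bitmap bucket =>
      if (bucket.length : Int) ≥ support then (bitmap + 1) * 2 else bitmap * 2) (2 * a)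
    = 2 * l.foldl (fun acc b =>
        acc * 2 + (if (b.length : Int) ≥ support then 1 else 0)) a := by
  induction l generalizing a with
  | nil => simp
  | cons b l ih =>
    simp only [List.foldl_cons]
    rw [show (if (b.length : Int) ≥ support then (2 * a + 1) * 2 else 2 * a * 2)
          = 2 * (a * 2 + (if (b.length : Int) ≥ support then 1 else 0)) by split <;> ring]
    exact ih _

theorem generate_bitmap_spec : Claim_equal_generate_bitmap := by
  intro buckets support _
  unfold Spec_generate_bitmap generate_bitmap generate_bitmap_alt
  rw [show (0 : Int) = 2 * 0 by ring, pv_fold_double]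
  rw [PySem.Int.floordiv_eq_ediv_of_pos (by norm_num)]
  rw [Int.mul_ediv_cancel_left _ (by norm_num)]
  cases buckets with
  | nil => simp
  | cons b l => simp [List.foldl_map]
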